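-- pv_equiv track=rewrite | github.com/aristath/portfolioManager | display/python/main.py | columns_to_bitmap
-- ===== SOURCE A (Python) =====
-- MATRIX_ROWS = 8
--
-- MATRIX_COLS = 13
--
-- def columns_to_bitmap(columns):
--     """Convert column-based font data to 8x13 bitmap array.
--
--     Returns 104 bytes in row-major order.
--     Each byte is brightness level 0-7 (3-bit grayscale per Uno Q docs).
--     0 = off, 7 = full brightness.
--     Font columns are stored with LSB = top row (row 0).
--     """
--     bitmap = []
--     for row in range(MATRIX_ROWS):
--         for col in range(MATRIX_COLS):
--             if col < len(columns):
--                 # Check if this pixel is set in the column byte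
--                 # Bit 0 = row 0 (top), bit 7 = row 7 (bottom)
--                 # 7 = on (full brightness), 0 = off
--                 pixel = 7 if (columns[col] & (1 << row)) else 0
--             else:
--                 pixel = 0  # Background = off
--             bitmap.append(pixel)
--     return bitmap
-- ===== SOURCE B (Python) =====
-- MATRIX_ROWS = 8
--
-- MATRIX_COLS = 13
--
-- def columns_to_bitmap(columns):
--     """Convert column-based font data to 8x13 bitmap array (104 values, row-major)."""
--     # First pass: decode each of the 13 columns into its 8 pixel values
--     # (missing columns become all-off), giving a column-major table.
--     table = []
--     for col in range(MATRIX_COLS):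
--         if col < len(columns):
--             v = columns[col]
--             table.append([7 if v & (1 << row) else 0 for row in range(MATRIX_ROWS)])
--         else:
--             table.append([0] * MATRIX_ROWS)
--     # Second pass: transpose to row-major order.
--     out = []
--     for row in range(MATRIX_ROWS):
--         for col in range(MATRIX_COLS):
--             out.append(table[col][row])
--     return out
-- ===== Notes on version B (the rewrite author's own statement) =====
-- stated objective: alternative
-- what changed: B first decodes the input into an explicit column-major table (one 8-pixel list per of the 13 columns, all-zero for missing columns) and then flattens it row-major in a second transposing pass, instead of A's single nested row/col scan computing each cell inline.
import Mathlib
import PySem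

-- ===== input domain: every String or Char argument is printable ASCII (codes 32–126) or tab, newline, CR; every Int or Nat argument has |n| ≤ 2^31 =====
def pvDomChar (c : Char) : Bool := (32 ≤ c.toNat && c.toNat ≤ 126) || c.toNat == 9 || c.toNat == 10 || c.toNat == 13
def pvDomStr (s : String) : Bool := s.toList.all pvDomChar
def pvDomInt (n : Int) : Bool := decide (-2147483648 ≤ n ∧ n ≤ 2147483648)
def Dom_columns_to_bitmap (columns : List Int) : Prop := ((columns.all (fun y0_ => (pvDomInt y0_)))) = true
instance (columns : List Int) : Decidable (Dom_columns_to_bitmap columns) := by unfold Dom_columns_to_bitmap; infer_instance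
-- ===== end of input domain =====

-- B builds an explicit column-major table (one 8-pixel list per column) and then
-- flattens it with a transposing pass, instead of A's single inline nested scan.

-- ===== PORT A =====
def columns_to_bitmap (columns : List Int) : List Int :=
  (PySem.List.pyRange 0 8 1).foldl (fun bitmap row =>
    (PySem.List.pyRange 0 13 1).foldl (fun bitmap col =>
      let pixel : Int :=
        if col < (columns.length : Int) then
          if PySem.Int.band (PySem.List.pyGetD columns col 0) ((1:Int) <<< row.toNat) ≠ 0 then 7 else 0
        else 0
      bitmap ++ [pixel]) bitmap) []

-- ===== PORT B =====
-- one column of Source B's table: the 8 pixel values of column `col` (all-off if missing)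
def decodeColumn (columns : List Int) (col : Nat) : List Int :=
  match columns[col]? with
  | some v => (List.range 8).map (fun (row : Nat) => if PySem.Int.band v ((1:Int) <<< row) ≠ 0 then (7:Int) else 0)
  | none => List.replicate 8 0

def columns_to_bitmap_alt (columns : List Int) : List Int :=
  let table := (List.range 13).map (decodeColumn columns)
  (List.range 8).flatMap (fun row => (List.range 13).map (fun col => (table.getD col []).getD row 0))

-- ===== PRECONDITION & SPEC =====
def Spec_columns_to_bitmap (columns : List Int) (out : List Int) : Prop := out = columns_to_bitmap_alt columns
instance (columns : List Int) (out : List Int) : Decidable (Spec_columns_to_bitmap columns out) := by unfold Spec_columns_to_bitmap; infer_instance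

-- ===== CLAIM (what is proved, stated in full; the proofs are below) =====
def Claim_equal_columns_to_bitmap : Prop := ∀ (columns : List Int), Dom_columns_to_bitmap columns → Spec_columns_to_bitmap columns (columns_to_bitmap columns)

-- ===== LEMMAS AND PROOFS =====

-- A's inline cell value equals B's table lookup, for one cell
theorem cell_eq (xs : List Int) (c r : Nat) (hr : r < 8) :
    (if c < xs.length then
       (if PySem.Int.band (PySem.List.pyGetD xs (c : Int) 0) ((1:Int) <<< r) = 0 then (0:Int) else 7)
     else 0)
    = (decodeColumn xs c)[r]?.getD 0 := by
  unfold decodeColumn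
  rcases h : xs[c]? with _ | v
  · rw [List.getElem?_eq_none_iff] at h
    rw [if_neg (by omega), List.getElem?_replicate]
    simp [hr]
  · have hlt : c < xs.length := (List.getElem?_eq_some_iff.mp h).1
    have hv : PySem.List.pyGetD xs (c : Int) 0 = v := by
      rw [PySem.List.pyGetD_eq_getElem xs 0 (by positivity) (by exact_mod_cast hlt)]
      simpa using (List.getElem?_eq_some_iff.mp h).2
    rw [if_pos hlt, hv, List.getElem?_map, List.getElem?_range hr]
    simp only [Option.map_some, Option.getD_some]
    split <;> simp_all

-- ===== VERDICT =====
set_option maxRecDepth 40000 in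
theorem columns_to_bitmap_spec : Claim_equal_columns_to_bitmap := by
  unfold Claim_equal_columns_to_bitmap
  intro columns _
  unfold Spec_columns_to_bitmap columns_to_bitmap columns_to_bitmap_alt
  rw [show PySem.List.pyRange 0 8 1 = [0,1,2,3,4,5,6,7] from by decide,
      show PySem.List.pyRange 0 13 1 = [0,1,2,3,4,5,6,7,8,9,10,11,12] from by decide]
  simp only [List.foldl, List.nil_append]
  rw [show List.range 13 = [0,1,2,3,4,5,6,7,8,9,10,11,12] from by decide,
      show List.range 8 = [0,1,2,3,4,5,6,7] from by decide]
  simp only [List.map, List.flatMap, List.getD, List.getElem?_cons_zero, List.getElem?_cons_succ,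
    List.flatten, Option.getD_some]
  norm_num
  exact ⟨cell_eq columns 0 0 (by norm_num), cell_eq columns 1 0 (by norm_num), cell_eq columns 2 0 (by norm_num), cell_eq columns 3 0 (by norm_num), cell_eq columns 4 0 (by norm_num), cell_eq columns 5 0 (by norm_num), cell_eq columns 6 0 (by norm_num), cell_eq columns 7 0 (by norm_num), cell_eq columns 8 0 (by norm_num), cell_eq columns 9 0 (by norm_num), cell_eq columns 10 0 (by norm_num), cell_eq columns 11 0 (by norm_num), cell_eq columns 12 0 (by norm_num), cell_eq columns 0 1 (by norm_num), cell_eq columns 1 1 (by norm_num), cell_eq columns 2 1 (by norm_num), cell_eq columns 3 1 (by norm_num), cell_eq columns 4 1 (by norm_num), cell_eq columns 5 1 (by norm_num), cell_eq columns 6 1 (by norm_num), cell_eq columns 7 1 (by norm_num), cell_eq columns 8 1 (by norm_num), cell_eq columns 9 1 (by norm_num), cell_eq columns 10 1 (by norm_num), cell_eq columns 11 1 (by norm_num), cell_eq columns 12 1 (by norm_num), cell_eq columns 0 2 (by norm_num), cell_eq columns 1 2 (by norm_num), cell_eq columns 2 2 (by norm_num), cell_eq columns 3 2 (by norm_num),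 cell_eq columns 4 2 (by norm_num), cell_eq columns 5 2 (by norm_num), cell_eq columns 6 2 (by norm_num), cell_eq columns 7 2 (by norm_num), cell_eq columns 8 2 (by norm_num), cell_eq columns 9 2 (by norm_num), cell_eq columns 10 2 (by norm_num), cell_eq columns 11 2 (by norm_num), cell_eq columns 12 2 (by norm_num), cell_eq columns 0 3 (by norm_num), cell_eq columns 1 3 (by norm_num), cell_eq columns 2 3 (by norm_num), cell_eq columns 3 3 (by norm_num), cell_eq columns 4 3 (by norm_num), cell_eq columns 5 3 (by norm_num), cell_eq columns 6 3 (by norm_num), cell_eq columns 7 3 (by norm_num), cell_eq columns 8 3 (by norm_num), cell_eq columns 9 3 (by norm_num), cell_eq columns 10 3 (by norm_num), cell_eq columns 11 3 (by norm_num), cell_eq columns 12 3 (by norm_num), cell_eq columns 0 4 (by norm_num), cell_eq columns 1 4 (by norm_num), cell_eq columns 2 4 (by norm_num), cell_eq columns 3 4 (by norm_num), cell_eq columns 4 4 (by norm_num), cell_eq columns 5 4 (by norm_num), cell_eq columns 6 4 (by norm_num), cell_eq columns 7 4 (by norm_num), cell_eq columns 8 4 (by norm_num), cell_eq columns 9 4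 (by norm_num), cell_eq columns 10 4 (by norm_num), cell_eq columns 11 4 (by norm_num), cell_eq columns 12 4 (by norm_num), cell_eq columns 0 5 (by norm_num), cell_eq columns 1 5 (by norm_num), cell_eq columns 2 5 (by norm_num), cell_eq columns 3 5 (by norm_num), cell_eq columns 4 5 (by norm_num), cell_eq columns 5 5 (by norm_num), cell_eq columns 6 5 (by norm_num), cell_eq columns 7 5 (by norm_num), cell_eq columns 8 5 (by norm_num), cell_eq columns 9 5 (by norm_num), cell_eq columns 10 5 (by norm_num), cell_eq columns 11 5 (by norm_num), cell_eq columns 12 5 (by norm_num), cell_eq columns 0 6 (by norm_num), cell_eq columns 1 6 (by norm_num), cell_eq columns 2 6 (by norm_num), cell_eq columns 3 6 (by norm_num), cell_eq columns 4 6 (by norm_num), cell_eq columns 5 6 (by norm_num), cell_eq columns 6 6 (by norm_num), cell_eq columns 7 6 (by norm_num), cell_eq columns 8 6 (by norm_num), cell_eq columns 9 6 (by norm_num), cell_eq columns 10 6 (by norm_num), cell_eq columns 11 6 (by norm_num), cell_eq columns 12 6 (by norm_num), cell_eq columns 0 7 (by norm_num), cell_eq columns 1 7 (by norm_num), cell_eq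 columns 2 7 (by norm_num), cell_eq columns 3 7 (by norm_num), cell_eq columns 4 7 (by norm_num), cell_eq columns 5 7 (by norm_num), cell_eq columns 6 7 (by norm_num), cell_eq columns 7 7 (by norm_num), cell_eq columns 8 7 (by norm_num), cell_eq columns 9 7 (by norm_num), cell_eq columns 10 7 (by norm_num), cell_eq columns 11 7 (by norm_num), cell_eq columns 12 7 (by norm_num)⟩
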